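-- pv_equiv track=rewrite | github.com/founders1776/steel-stealer | generate_shopify_csv.py | dedup_by_sku
-- ===== SOURCE A (Python) =====
-- def dedup_by_sku(products):
--     """Deduplicate products by SKU. Merge: combine brands, keep longest name."""
--     sku_map = {}
--
--     for key, prod in products.items():
--         sku = prod.get("sku", "")
--         if not sku:
--             continue
--
--         if sku in sku_map:
--             existing = sku_map[sku]
--             # Merge brands
--             existing_brands = {b.strip() for b in existing.get("brand", "").split(",") if b.strip()}
--             new_brands = {b.strip() for b in prod.get("brand", "").split(",") if b.strip()}
--             combined = sorted(existing_brands | new_brands)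
--             existing["brand"] = ",".join(combined)
--             # Keep longest clean_name
--             if len(prod.get("clean_name", "")) > len(existing.get("clean_name", "")):
--                 existing["clean_name"] = prod["clean_name"]
--             # Keep description if longer
--             if len(prod.get("description", "")) > len(existing.get("description", "")):
--                 existing["description"] = prod["description"]
--         else:
--             sku_map[sku] = dict(prod)  # copy
--
--     return sku_map
-- ===== SOURCE B (Python) =====
-- def dedup_by_sku(products):
--     """Deduplicate products by SKU: group by SKU first, then reduce each group."""
--     groups = {}
--     for prod in products.values():
--         sku = prod.get("sku", "")
--         if sku:
--             groups.setdefault(sku, []).append(prod)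
--
--     result = {}
--     for sku, group in groups.items():
--         merged = dict(group[0])
--         for prod in group[1:]:
--             _merge_into(merged, prod)
--         result[sku] = merged
--     return result
--
--
-- def _merge_into(merged, prod):
--     old = {b.strip() for b in merged.get("brand", "").split(",") if b.strip()}
--     new = {b.strip() for b in prod.get("brand", "").split(",") if b.strip()}
--     merged["brand"] = ",".join(sorted(old | new))
--     for field in ("clean_name", "description"):
--         if len(prod.get(field, "")) > len(merged.get(field, "")):
--             merged[field] = prod[field]
-- ===== Notes on version B (the rewrite author's own statement) =====
-- stated objective: alternative
-- what changed: A streams over the products merging each one immediately into a single result dict; B first builds an index grouping the products of each non-empty SKU, then reduces every group independently (copy of the first product, fold the merge over the rest) into the result.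
import Mathlib
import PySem

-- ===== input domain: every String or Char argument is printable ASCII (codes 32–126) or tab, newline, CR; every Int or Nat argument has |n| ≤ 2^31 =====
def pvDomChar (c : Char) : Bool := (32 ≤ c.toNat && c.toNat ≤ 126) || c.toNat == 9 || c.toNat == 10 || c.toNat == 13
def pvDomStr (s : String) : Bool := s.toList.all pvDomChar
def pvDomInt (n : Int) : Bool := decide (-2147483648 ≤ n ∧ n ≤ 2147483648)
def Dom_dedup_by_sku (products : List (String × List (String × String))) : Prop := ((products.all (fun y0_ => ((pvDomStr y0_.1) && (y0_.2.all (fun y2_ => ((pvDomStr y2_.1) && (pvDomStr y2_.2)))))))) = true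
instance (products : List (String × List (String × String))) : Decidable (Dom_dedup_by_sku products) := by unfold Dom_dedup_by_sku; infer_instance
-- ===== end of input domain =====

-- B replaces A's streaming merge-as-you-go over one dict by a two-pass group-by-SKU
-- then reduce-each-group decomposition (objective: alternative, same cost).
-- Equivalence of the RETURN value is proved for ALL inputs (A is total and mutates only
-- its own copies, never the argument).

-- ===== PORT A =====
-- the `,`-separated brand tokens, stripped, empty ones dropped, as a Python set
-- (split? is always `some` here: the separator is the literal "," ≠ "")
def dedup_by_sku (products : List (String × List (String × String))) : List (String × List (String × String)) :=
  let sku_map : PySem.Dict String (PySem.Dict String String) :=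
    (PySem.Dict.ofList products).items.foldl (fun sku_map kp =>
      let prod : PySem.Dict String String := PySem.Dict.ofList kp.2
      let sku := prod.getD "sku" ""
      if sku = "" then sku_map
      else if sku_map.contains sku then
        let existing := sku_map.getD sku PySem.Dict.empty
        let existing_brands := PySem.Set.ofList ((((PySem.Str.split? (existing.getD "brand" "") ",").getD []).map PySem.Str.strip).filter (fun b => b != ""))
        let new_brands := PySem.Set.ofList ((((PySem.Str.split? (prod.getD "brand" "") ",").getD []).map PySem.Str.strip).filter (fun b => b != ""))
        let combined := PySem.List.sorted (PySem.Set.union existing_brands new_brands) (fun x => x) false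
        let existing := existing.insert "brand" (PySem.Str.join "," combined)
        -- prod["clean_name"] / prod["description"] are only read when the key is present
        -- (its length is strictly positive), so getD is exact
        let existing := if PySem.Str.len (existing.getD "clean_name" "") < PySem.Str.len (prod.getD "clean_name" "") then existing.insert "clean_name" (prod.getD "clean_name" "") else existing
        let existing := if PySem.Str.len (existing.getD "description" "") < PySem.Str.len (prod.getD "description" "") then existing.insert "description" (prod.getD "description" "") else existing
        sku_map.insert sku existing
      else sku_map.insert sku ⟨prod.items⟩)  -- dict(prod): a fresh copy with the same items
    PySem.Dict.empty
  sku_map.items.map (fun p => (p.1, p.2.items))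

-- ===== PORT B =====
-- _merge_into(merged, prod), returning the updated dict
def pvMergeInto (merged prod : PySem.Dict String String) : PySem.Dict String String :=
  let old := PySem.Set.ofList ((((PySem.Str.split? (merged.getD "brand" "") ",").getD []).map PySem.Str.strip).filter (fun b => b != ""))
  let nw := PySem.Set.ofList ((((PySem.Str.split? (prod.getD "brand" "") ",").getD []).map PySem.Str.strip).filter (fun b => b != ""))
  let merged := merged.insert "brand" (PySem.Str.join "," (PySem.List.sorted (PySem.Set.union old nw) (fun x => x) false))
  ["clean_name", "description"].foldl (fun merged field =>
    if PySem.Str.len (merged.getD field "") < PySem.Str.len (prod.getD field "") then merged.insert field (prod.getD field "") else merged) merged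

-- merged = dict(group[0]); for prod in group[1:]: _merge_into(merged, prod)
-- (groups are built non-empty, so the [] case is unreachable)
def pvMergeGroup (group : List (PySem.Dict String String)) : PySem.Dict String String :=
  match group with
  | [] => PySem.Dict.empty
  | p :: rest => rest.foldl pvMergeInto ⟨p.items⟩

def dedup_by_sku_alt (products : List (String × List (String × String))) : List (String × List (String × String)) :=
  let groups : PySem.Dict String (List (PySem.Dict String String)) :=
    (PySem.Dict.ofList products).items.foldl (fun g kp =>
      let prod : PySem.Dict String String := PySem.Dict.ofList kp.2
      let sku := prod.getD "sku" ""
      if sku = "" then g else g.modify sku [] (· ++ [prod])) PySem.Dict.empty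
  let result : PySem.Dict String (PySem.Dict String String) :=
    groups.items.foldl (fun r p => r.insert p.1 (pvMergeGroup p.2)) PySem.Dict.empty
  result.items.map (fun p => (p.1, p.2.items))

-- ===== PRECONDITION & SPEC =====
def Spec_dedup_by_sku (products : List (String × List (String × String))) (out : List (String × List (String × String))) : Prop := out = dedup_by_sku_alt products
instance (products : List (String × List (String × String))) (out : List (String × List (String × String))) : Decidable (Spec_dedup_by_sku products out) := by unfold Spec_dedup_by_sku; infer_instance

-- ===== CLAIM (what is proved, stated in full; the proofs are below) =====
def Claim_equal_dedup_by_sku : Prop := ∀ (products : List (String × List (String × String))), Dom_dedup_by_sku products → Spec_dedup_by_sku products (dedup_by_sku products)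

-- ===== LEMMAS AND PROOFS =====

-- A's loop body (inline merge recognised as pvMergeInto), with the converted product pulled out
def pvStepA' (acc : PySem.Dict String (PySem.Dict String String)) (prod : PySem.Dict String String) : PySem.Dict String (PySem.Dict String String) :=
  if prod.getD "sku" "" = "" then acc
  else if acc.contains (prod.getD "sku" "") then
    acc.insert (prod.getD "sku" "") (pvMergeInto (acc.getD (prod.getD "sku" "") PySem.Dict.empty) prod)
  else acc.insert (prod.getD "sku" "") ⟨prod.items⟩

def pvStepA (acc : PySem.Dict String (PySem.Dict String String)) (kp : String × List (String × String)) : PySem.Dict String (PySem.Dict String String) :=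
  pvStepA' acc (PySem.Dict.ofList kp.2)

-- B's grouping loop body
def pvStepB' (g : PySem.Dict String (List (PySem.Dict String String))) (prod : PySem.Dict String String) : PySem.Dict String (List (PySem.Dict String String)) :=
  if prod.getD "sku" "" = "" then g else g.modify (prod.getD "sku" "") [] (· ++ [prod])

def pvStepB (g : PySem.Dict String (List (PySem.Dict String String))) (kp : String × List (String × String)) : PySem.Dict String (List (PySem.Dict String String)) :=
  pvStepB' g (PySem.Dict.ofList kp.2)

-- A's merged dict is B's groups dict with each group folded down
def pvReflect (G : PySem.Dict String (List (PySem.Dict String String))) : PySem.Dict String (PySem.Dict String String) :=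
  ⟨G.items.map (fun p => (p.1, pvMergeGroup p.2))⟩

lemma pvKeys_reflect (G : PySem.Dict String (List (PySem.Dict String String))) :
    (pvReflect G).keys = G.keys := by
  simp [pvReflect, PySem.Dict.keys, List.map_map, Function.comp]

lemma pvContains_reflect (G : PySem.Dict String (List (PySem.Dict String String))) (s : String) :
    (pvReflect G).contains s = G.contains s := by
  rw [PySem.Dict.contains_eq_decide_mem_keys, PySem.Dict.contains_eq_decide_mem_keys, pvKeys_reflect]

lemma pvVal_unique {v : Type} (d : PySem.Dict String v) {k : String} {a b : v}
    (hnd : d.keys.Nodup) (h1 : (k, a) ∈ d.items) (h2 : (k, b) ∈ d.items) : a = b := by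
  have ha := PySem.Dict.get?_of_mem_items d h1 hnd
  have hb := PySem.Dict.get?_of_mem_items d h2 hnd
  rw [ha] at hb
  exact Option.some.inj hb

lemma pvMergeGroup_append (p : PySem.Dict String String) (rest : List (PySem.Dict String String)) (x : PySem.Dict String String) :
    pvMergeGroup ((p :: rest) ++ [x]) = pvMergeInto (pvMergeGroup (p :: rest)) x := by
  simp [pvMergeGroup, List.foldl_append]

lemma pvStep_reflect' (G : PySem.Dict String (List (PySem.Dict String String)))
    (hnd : G.keys.Nodup) (hne : ∀ p ∈ G.items, p.2 ≠ []) (prod : PySem.Dict String String) :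
    pvStepA' (pvReflect G) prod = pvReflect (pvStepB' G prod) := by
  unfold pvStepA' pvStepB'
  by_cases hsku : prod.getD "sku" "" = ""
  · simp [hsku]
  · simp only [hsku, if_false]
    by_cases hc : G.contains (prod.getD "sku" "") = true
    · simp only [pvContains_reflect, hc, if_true]
      obtain ⟨gr, hg⟩ : ∃ gr, G.get? (prod.getD "sku" "") = some gr := by
        have h := PySem.Dict.contains_eq_isSome_get? G (prod.getD "sku" "")
        rw [hc] at h
        exact Option.isSome_iff_exists.mp h.symm
      have hmem : (prod.getD "sku" "", gr) ∈ G.items :=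
        (PySem.Dict.get?_eq_some_iff_mem_items G _ _ hnd).mp hg
      have hgetG : G.getD (prod.getD "sku" "") [] = gr := PySem.Dict.getD_of_mem_items G hmem hnd []
      have hndR : (pvReflect G).keys.Nodup := by rw [pvKeys_reflect]; exact hnd
      have hmemR : (prod.getD "sku" "", pvMergeGroup gr) ∈ (pvReflect G).items :=
        List.mem_map.mpr ⟨(prod.getD "sku" "", gr), hmem, rfl⟩
      have hgetR : (pvReflect G).getD (prod.getD "sku" "") PySem.Dict.empty = pvMergeGroup gr :=
        PySem.Dict.getD_of_mem_items _ hmemR hndR _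
      rw [hgetR]
      simp only [PySem.Dict.modify, hgetG]
      apply PySem.Dict.ext
      rw [PySem.Dict.items_insert_of_contains _ _ (by rw [pvContains_reflect]; exact hc)]
      show _ = (pvReflect (G.insert _ _)).items
      simp only [pvReflect]
      rw [PySem.Dict.items_insert_of_contains _ _ hc]
      simp only [List.map_map]
      apply List.map_congr_left
      intro q hq
      simp only [Function.comp]
      by_cases h1 : q.1 = prod.getD "sku" ""
      · have hq' : (q.1, q.2) ∈ G.items := by simpa using hq
        have h2 : q.2 = gr := pvVal_unique G hnd (h1 ▸ hq') hmem
        have hgr : gr ≠ [] := h2 ▸ hne q hq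
        obtain ⟨p0, rest, rfl⟩ : ∃ p0 rest, gr = p0 :: rest := by
          cases gr with
          | nil => exact absurd rfl hgr
          | cons p0 rest => exact ⟨p0, rest, rfl⟩
        have hstep := pvMergeGroup_append p0 rest prod
        rw [List.cons_append] at hstep
        simp [h1, hstep]
      · simp [h1]
    · have hc' : G.contains (prod.getD "sku" "") = false := by
        simpa using hc
      simp only [pvContains_reflect, hc', Bool.false_eq_true, if_false]
      simp only [PySem.Dict.modify, PySem.Dict.getD_of_not_contains G [] hc', List.nil_append]
      apply PySem.Dict.ext
      rw [PySem.Dict.items_insert_of_not_contains _ _ (by rw [pvContains_reflect]; exact hc')]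
      show _ = (pvReflect (G.insert _ _)).items
      simp only [pvReflect]
      rw [PySem.Dict.items_insert_of_not_contains _ _ hc']
      simp [pvMergeGroup]

lemma pvStepB_nodup (G : PySem.Dict String (List (PySem.Dict String String)))
    (hnd : G.keys.Nodup) (prod : PySem.Dict String String) : (pvStepB' G prod).keys.Nodup := by
  unfold pvStepB'
  split
  · exact hnd
  · exact PySem.Dict.nodup_keys_insert _ _ _ hnd

lemma pvStepB_ne (G : PySem.Dict String (List (PySem.Dict String String)))
    (hne : ∀ p ∈ G.items, p.2 ≠ []) (prod : PySem.Dict String String) :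
    ∀ p ∈ (pvStepB' G prod).items, p.2 ≠ [] := by
  unfold pvStepB'
  split
  · exact hne
  · intro p hp
    simp only [PySem.Dict.modify] at hp
    rcases (PySem.Dict.mem_items_insert _ _ _ _).mp hp with h | h
    · subst h; simp
    · exact hne p h.1

lemma pvFold_reflect (l : List (String × List (String × String))) :
    ∀ (G : PySem.Dict String (List (PySem.Dict String String))),
    G.keys.Nodup → (∀ p ∈ G.items, p.2 ≠ []) →
    l.foldl pvStepA (pvReflect G) = pvReflect (l.foldl pvStepB G) := by
  induction l with
  | nil => intro G _ _; rfl
  | cons kp t ih =>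
    intro G hnd hne
    have hstep : pvStepA (pvReflect G) kp = pvReflect (pvStepB G kp) :=
      pvStep_reflect' G hnd hne (PySem.Dict.ofList kp.2)
    simp only [List.foldl_cons, hstep]
    exact ih _ (pvStepB_nodup G hnd _) (pvStepB_ne G hne _)

lemma pvFoldB_nodup (l : List (String × List (String × String))) :
    ∀ (G : PySem.Dict String (List (PySem.Dict String String))), G.keys.Nodup →
    (l.foldl pvStepB G).keys.Nodup := by
  induction l with
  | nil => intro G h; exact h
  | cons kp t ih => intro G h; exact ih _ (pvStepB_nodup G h _)

-- ===== VERDICT (by name: the statement is the Claim_ definition above) =====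
theorem dedup_by_sku_spec : Claim_equal_dedup_by_sku := by
  intro products _
  show dedup_by_sku products = dedup_by_sku_alt products
  have hA : dedup_by_sku products =
      ((PySem.Dict.ofList products).items.foldl pvStepA PySem.Dict.empty).items.map
        (fun q => (q.1, q.2.items)) := rfl
  have hB : dedup_by_sku_alt products =
      (((PySem.Dict.ofList products).items.foldl pvStepB PySem.Dict.empty).items.foldl
          (fun r q => r.insert q.1 (pvMergeGroup q.2)) PySem.Dict.empty).items.map
        (fun q => (q.1, q.2.items)) := rfl
  have hemp : ∀ p ∈ (PySem.Dict.empty : PySem.Dict String (List (PySem.Dict String String))).items, p.2 ≠ [] := by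
    intro p hp
    simp [PySem.Dict.empty] at hp
  have hRefl : (PySem.Dict.ofList products).items.foldl pvStepA PySem.Dict.empty =
      pvReflect ((PySem.Dict.ofList products).items.foldl pvStepB PySem.Dict.empty) :=
    pvFold_reflect _ _ PySem.Dict.nodup_keys_empty hemp
  have hndG : ((PySem.Dict.ofList products).items.foldl pvStepB PySem.Dict.empty).keys.Nodup :=
    pvFoldB_nodup _ _ PySem.Dict.nodup_keys_empty
  have hfresh := PySem.Dict.items_foldl_insert_fresh
    ((PySem.Dict.ofList products).items.foldl pvStepB PySem.Dict.empty).items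
    (fun q => q.1) (fun q => pvMergeGroup q.2)
    (PySem.Dict.empty : PySem.Dict String (PySem.Dict String String))
    (by intro a _; exact PySem.Dict.contains_empty _)
    (by simpa [PySem.Dict.keys] using hndG)
  have hfresh' : (((PySem.Dict.ofList products).items.foldl pvStepB PySem.Dict.empty).items.foldl
      (fun r q => r.insert q.1 (pvMergeGroup q.2)) PySem.Dict.empty).items =
      ((PySem.Dict.ofList products).items.foldl pvStepB PySem.Dict.empty).items.map
        (fun q => (q.1, pvMergeGroup q.2)) := by simpa using hfresh
  rw [hA, hB, hRefl, hfresh']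
  simp [pvReflect, List.map_map]
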